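-- pv_equiv track=rewrite | github.com/TomekGniazdowski/carlier-algorithm | funkcje.py | zwroc_c
-- ===== SOURCE A (Python) =====
-- def zwroc_c(a, b, q):
--     c = -1
--     for j in range(a, b + 1):
--         if q[j] < q[b]:
--             c = j
--     if c != -1:
--         return c
--     if c == -1:
--         return None
-- ===== SOURCE B (Python) =====
-- def zwroc_c(a, b, q):
--     for j in range(b, a - 1, -1):
--         if q[j] < q[b]:
--             return j
--     return None
-- ===== Notes on version B (the rewrite author's own statement) =====
-- stated objective: simpler
-- what changed: B scans backwards from b to a and returns the first qualifying index (the last one in forward order) immediately, instead of scanning forward while overwriting a -1 sentinel and decoding the sentinel at the end.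
-- outside the precondition, e.g. on zwroc_c(-1, 0, [2, 1]): A returns None, B returns -1
import Mathlib
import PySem

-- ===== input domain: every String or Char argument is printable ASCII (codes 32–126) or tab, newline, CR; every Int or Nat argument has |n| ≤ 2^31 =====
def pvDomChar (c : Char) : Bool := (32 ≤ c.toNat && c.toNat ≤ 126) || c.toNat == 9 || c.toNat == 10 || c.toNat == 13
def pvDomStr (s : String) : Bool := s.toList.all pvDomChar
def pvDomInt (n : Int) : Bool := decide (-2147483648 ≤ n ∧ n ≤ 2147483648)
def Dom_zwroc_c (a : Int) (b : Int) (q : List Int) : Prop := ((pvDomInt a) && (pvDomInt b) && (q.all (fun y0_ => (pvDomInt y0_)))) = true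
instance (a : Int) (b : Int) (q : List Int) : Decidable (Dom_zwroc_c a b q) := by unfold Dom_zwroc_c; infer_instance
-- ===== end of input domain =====

-- ===== PORT A =====
-- B scans b..a backwards and returns the first hit, instead of A's forward scan with a -1 sentinel (simpler decomposition; same cost).
def zwroc_c (a : Int) (b : Int) (q : List Int) : Option Int :=
  let c : Int := (PySem.List.pyRange a (b + 1) 1).foldl
    (fun c j =>
      match PySem.List.pyGet? q j, PySem.List.pyGet? q b with
      | some x, some y => if x < y then j else c
      | _, _ => c)   -- Python raises IndexError here; excluded by Pre_
    (-1)
  if c ≠ -1 then some c else none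

-- ===== PORT B =====
def zwroc_c_alt (a : Int) (b : Int) (q : List Int) : Option Int :=
  (PySem.List.pyRange b (a - 1) (-1)).find?
    (fun j =>
      match PySem.List.pyGet? q j with
      | none => false  -- Python raises IndexError here; excluded by Pre_
      | some x =>
        match PySem.List.pyGet? q b with
        | none => false
        | some y => decide (x < y))

-- ===== PRECONDITION & SPEC =====
-- Pre_ excludes negative-index inputs: there Python's wraparound indexing applies and A's
-- -1 sentinel collides with the index -1 (A returns None even after a hit at j = -1, an
-- implementation artifact; B returns that index) — and out-of-range indices, where A raises IndexError.
def Pre_zwroc_c (a : Int) (b : Int) (q : List Int) : Prop :=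
  b < a ∨ (0 ≤ a ∧ b < (q.length : Int))
instance (a : Int) (b : Int) (q : List Int) : Decidable (Pre_zwroc_c a b q) := by
  unfold Pre_zwroc_c; infer_instance
def pvWitness_zwroc_c : Int × Int × List Int := (0, 2, [5, 1, 4])

def Spec_zwroc_c (a : Int) (b : Int) (q : List Int) (out : Option Int) : Prop := out = zwroc_c_alt a b q
instance (a : Int) (b : Int) (q : List Int) (out : Option Int) : Decidable (Spec_zwroc_c a b q out) := by unfold Spec_zwroc_c; infer_instance

-- ===== CLAIM (what is proved, stated in full; the proofs are below) =====
def Claim_equal_zwroc_c : Prop := ∀ (a : Int) (b : Int) (q : List Int), Dom_zwroc_c a b q → Pre_zwroc_c a b q → Spec_zwroc_c a b q (zwroc_c a b q)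

-- ===== LEMMAS AND PROOFS =====

-- A's forward fold with overwrite computes the last satisfying element = find? on the reverse.
theorem foldl_overwrite_eq_find_reverse (p : Int → Bool) :
    ∀ (l : List Int) (init : Int),
      l.foldl (fun c j => if p j then j else c) init = (l.reverse.find? p).getD init := by
  intro l
  induction l with
  | nil => intro init; simp
  | cons x xs ih =>
    intro init
    simp only [List.foldl_cons, ih, List.reverse_cons, List.find?_append]
    cases h : xs.reverse.find? p with
    | some j => simp
    | none =>
      by_cases hp : p x <;> simp [List.find?, hp]

theorem zwroc_c_spec : Claim_equal_zwroc_c := by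
  unfold Claim_equal_zwroc_c Spec_zwroc_c zwroc_c zwroc_c_alt
  intro a b q _ hpre
  set p : Int → Bool := fun j =>
    match PySem.List.pyGet? q j with
    | none => false
    | some x =>
      match PySem.List.pyGet? q b with
      | none => false
      | some y => decide (x < y)
    with hpdef
  have hstep : (fun (c j : Int) =>
      match PySem.List.pyGet? q j, PySem.List.pyGet? q b with
      | some x, some y => if x < y then j else c
      | _, _ => c) = fun c j => if p j then j else c := by
    funext c j
    simp only [hpdef]
    cases PySem.List.pyGet? q j <;> cases PySem.List.pyGet? q b <;> simp
  have hrev : PySem.List.pyRange b (a - 1) (-1) = (PySem.List.pyRange a (b + 1) 1).reverse := by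
    rw [PySem.List.pyRange_neg_one_eq_reverse]
    norm_num
  rw [hstep, hrev, foldl_overwrite_eq_find_reverse]
  cases hf : (PySem.List.pyRange a (b + 1) 1).reverse.find? p with
  | none => simp
  | some j =>
    have hj : j ∈ (PySem.List.pyRange a (b + 1) 1).reverse := List.mem_of_find?_eq_some hf
    have hj' : a ≤ j ∧ j < b + 1 := (PySem.List.mem_pyRange_one).1 (List.mem_reverse.1 hj)
    have ha : 0 ≤ a := by
      rcases hpre with h | h
      · exfalso; omega
      · exact h.1
    have : j ≠ -1 := by omega
    simp [this]
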